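-- pv_equiv track=rewrite | github.com/anguillanneuf/bigO | 39 time_planner.py | meeting_planner_helper
-- ===== SOURCE A (Python) =====
-- def meeting_planner_helper(slotsA, slotsB, dur, ptrA, ptrB):
--   if ptrA >= len(slotsA) or ptrB >= len(slotsB):
--     return []
--
--   startTime = max(slotsA[ptrA][0], slotsB[ptrB][0])
--   endTime = min(slotsA[ptrA][1], slotsB[ptrB][1])
--
--   if endTime - startTime >= dur:
--     return [startTime, startTime + dur]
--   else:
--     if slotsA[ptrA][1] < slotsB[ptrB][0]:
--       return meeting_planner_helper(slotsA, slotsB, dur, ptrA+1, ptrB)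
--     elif slotsA[ptrA][0] < slotsB[ptrB][1]:
--       return meeting_planner_helper(slotsA, slotsB, dur, ptrA, ptrB+1)
--     else:
--       return meeting_planner_helper(slotsA, slotsB, dur, ptrA+1, ptrB+1)
-- ===== SOURCE B (Python) =====
-- def _pair(s):
--     return (s[0], s[1])
--
-- def _advance(a0, a1, b0, b1):
--     if a1 < b0:
--         return (1, 0)
--     if a0 < b1:
--         return (0, 1)
--     return (1, 1)
--
-- def meeting_planner_helper(slotsA, slotsB, dur, ptrA, ptrB):
--     while ptrA < len(slotsA) and ptrB < len(slotsB):
--         a0, a1 = _pair(slotsA[ptrA])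
--         b0, b1 = _pair(slotsB[ptrB])
--         startTime = max(a0, b0)
--         endTime = min(a1, b1)
--         if endTime - startTime >= dur:
--             return [startTime, startTime + dur]
--         dA, dB = _advance(a0, a1, b0, b1)
--         ptrA += dA
--         ptrB += dB
--     return []
-- ===== Notes on version B (the rewrite author's own statement) =====
-- stated objective: simpler
-- what changed: The recursion is replaced by an iterative while loop over the two pointers, with the three-way advance decision factored into a helper returning a (dA,dB) increment pair added to the pointers (one loop-back point instead of three recursive calls).
-- outside the precondition, e.g. on meeting_planner_helper([[0, 10], [5]], [[0, 10]], 1, 0, 0): A returns [0, 1], B returns [0, 1]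
import Mathlib
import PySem

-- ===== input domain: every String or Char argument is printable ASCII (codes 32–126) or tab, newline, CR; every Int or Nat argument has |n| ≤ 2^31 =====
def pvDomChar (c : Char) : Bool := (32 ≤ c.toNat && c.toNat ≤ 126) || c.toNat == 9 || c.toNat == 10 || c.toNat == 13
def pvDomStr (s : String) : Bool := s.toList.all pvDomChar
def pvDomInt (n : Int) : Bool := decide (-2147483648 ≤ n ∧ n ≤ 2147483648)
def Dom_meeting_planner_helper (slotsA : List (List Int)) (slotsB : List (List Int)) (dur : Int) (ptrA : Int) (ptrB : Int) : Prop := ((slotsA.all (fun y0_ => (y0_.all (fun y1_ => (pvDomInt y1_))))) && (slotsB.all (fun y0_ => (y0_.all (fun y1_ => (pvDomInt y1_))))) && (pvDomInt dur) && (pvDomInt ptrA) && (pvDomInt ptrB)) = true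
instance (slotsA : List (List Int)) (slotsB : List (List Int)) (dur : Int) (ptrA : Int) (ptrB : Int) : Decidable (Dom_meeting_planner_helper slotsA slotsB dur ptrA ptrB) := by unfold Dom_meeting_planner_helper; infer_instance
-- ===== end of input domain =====

-- B replaces A's three-call recursion by an iterative while loop over the two pointers,
-- reading each slot via a pair helper and advancing by a computed (dA,dB) increment.

-- ===== PORT A =====
-- Literal port of A's recursion. Both ports use a fuel parameter only to make the
-- recursion structural; fuel = remaining pointer distance + 1 never runs out before
-- the guard triggers, so fuel is a totality guard, not an algorithm change.
-- `none` from pyGet? models Python's IndexError (excluded by Pre_).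
def mph_go (slotsA : List (List Int)) (slotsB : List (List Int)) (dur : Int) : Nat → Int → Int → List Int
  | 0, _, _ => []
  | fuel + 1, ptrA, ptrB =>
    if ptrA ≥ (slotsA.length : Int) ∨ ptrB ≥ (slotsB.length : Int) then []
    else
      match PySem.List.pyGet? slotsA ptrA, PySem.List.pyGet? slotsB ptrB with
      | some a, some b =>
        match PySem.List.pyGet? a 0, PySem.List.pyGet? a 1, PySem.List.pyGet? b 0, PySem.List.pyGet? b 1 with
        | some a0, some a1, some b0, some b1 =>
          let startTime := max a0 b0
          let endTime := min a1 b1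
          if endTime - startTime ≥ dur then [startTime, startTime + dur]
          else if a1 < b0 then mph_go slotsA slotsB dur fuel (ptrA + 1) ptrB
          else if a0 < b1 then mph_go slotsA slotsB dur fuel ptrA (ptrB + 1)
          else mph_go slotsA slotsB dur fuel (ptrA + 1) (ptrB + 1)
        | _, _, _, _ => []  -- IndexError in Python (outside Pre_)
      | _, _ => []  -- IndexError in Python (outside Pre_)

def meeting_planner_helper (slotsA : List (List Int)) (slotsB : List (List Int)) (dur : Int) (ptrA : Int) (ptrB : Int) : List Int :=
  mph_go slotsA slotsB dur (((slotsA.length : Int) - ptrA).toNat + ((slotsB.length : Int) - ptrB).toNat + 1) ptrA ptrB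

-- ===== PORT B =====
-- s[0], s[1] read as a pair; none = IndexError (outside Pre_)
def mph_pair (s : List Int) : Option (Int × Int) :=
  match PySem.List.pyGet? s 0, PySem.List.pyGet? s 1 with
  | some x, some y => some (x, y)
  | _, _ => none

def mph_advance (a0 a1 b0 b1 : Int) : Int × Int :=
  if a1 < b0 then (1, 0)
  else if a0 < b1 then (0, 1)
  else (1, 1)

-- Source B's while loop as a tail-recursive loop over the state (ptrA, ptrB); same fuel guard as port A
def mph_loop (slotsA : List (List Int)) (slotsB : List (List Int)) (dur : Int) : Nat → Int → Int → List Int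
  | 0, _, _ => []
  | fuel + 1, ptrA, ptrB =>
    if ptrA < (slotsA.length : Int) ∧ ptrB < (slotsB.length : Int) then
      match (PySem.List.pyGet? slotsA ptrA).bind mph_pair, (PySem.List.pyGet? slotsB ptrB).bind mph_pair with
      | some (a0, a1), some (b0, b1) =>
        let startTime := max a0 b0
        let endTime := min a1 b1
        if endTime - startTime ≥ dur then [startTime, startTime + dur]
        else
          let d := mph_advance a0 a1 b0 b1
          mph_loop slotsA slotsB dur fuel (ptrA + d.1) (ptrB + d.2)
      | _, _ => []  -- IndexError in Python (outside Pre_)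
    else []

def meeting_planner_helper_alt (slotsA : List (List Int)) (slotsB : List (List Int)) (dur : Int) (ptrA : Int) (ptrB : Int) : List Int :=
  mph_loop slotsA slotsB dur (((slotsA.length : Int) - ptrA).toNat + ((slotsB.length : Int) - ptrB).toNat + 1) ptrA ptrB

-- ===== PRECONDITION & SPEC =====
-- Pre_ excludes inputs on which the scan can hit an IndexError: some slot shorter
-- than 2 entries, or an initial pointer below -len while the other is in range.
-- (On a few such inputs A still returns because the scan stops before reaching the
-- short slot; see the cite in claim.json.)
def Pre_meeting_planner_helper (slotsA : List (List Int)) (slotsB : List (List Int)) (dur : Int) (ptrA : Int) (ptrB : Int) : Prop :=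
  (ptrA ≥ (slotsA.length : Int) ∨ ptrB ≥ (slotsB.length : Int)) ∨
  (-(slotsA.length : Int) ≤ ptrA ∧ -(slotsB.length : Int) ≤ ptrB ∧
   (∀ s ∈ slotsA, 2 ≤ s.length) ∧ (∀ s ∈ slotsB, 2 ≤ s.length))
instance (slotsA : List (List Int)) (slotsB : List (List Int)) (dur : Int) (ptrA : Int) (ptrB : Int) : Decidable (Pre_meeting_planner_helper slotsA slotsB dur ptrA ptrB) := by unfold Pre_meeting_planner_helper; infer_instance

def pvWitness_meeting_planner_helper : List (List Int) × List (List Int) × Int × Int × Int :=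
  ([[1, 3], [5, 9]], [[2, 4], [6, 8]], 2, 0, 0)

def Spec_meeting_planner_helper (slotsA : List (List Int)) (slotsB : List (List Int)) (dur : Int) (ptrA : Int) (ptrB : Int) (out : List Int) : Prop := out = meeting_planner_helper_alt slotsA slotsB dur ptrA ptrB
instance (slotsA : List (List Int)) (slotsB : List (List Int)) (dur : Int) (ptrA : Int) (ptrB : Int) (out : List Int) : Decidable (Spec_meeting_planner_helper slotsA slotsB dur ptrA ptrB out) := by unfold Spec_meeting_planner_helper; infer_instance

-- ===== CLAIM (what is proved, stated in full; the proofs are below) =====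
def Claim_equal_meeting_planner_helper : Prop := ∀ (slotsA : List (List Int)) (slotsB : List (List Int)) (dur : Int) (ptrA : Int) (ptrB : Int), Dom_meeting_planner_helper slotsA slotsB dur ptrA ptrB → Pre_meeting_planner_helper slotsA slotsB dur ptrA ptrB → Spec_meeting_planner_helper slotsA slotsB dur ptrA ptrB (meeting_planner_helper slotsA slotsB dur ptrA ptrB)

-- ===== LEMMAS AND PROOFS =====

-- A's recursion and B's loop agree step for step (both return [] at exhausted fuel
-- and at the modelled IndexError), by induction on the fuel.
theorem mph_go_eq_loop (slotsA slotsB : List (List Int)) (dur : Int) :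
    ∀ (fuel : Nat) (ptrA ptrB : Int),
      mph_go slotsA slotsB dur fuel ptrA ptrB = mph_loop slotsA slotsB dur fuel ptrA ptrB := by
  intro fuel
  induction fuel with
  | zero => intro ptrA ptrB; rfl
  | succ n ih =>
    intro ptrA ptrB
    rw [mph_go, mph_loop]
    by_cases hstop : ptrA ≥ (slotsA.length : Int) ∨ ptrB ≥ (slotsB.length : Int)
    · rw [if_pos hstop, if_neg (by omega)]
    · rw [if_neg hstop, if_pos (by omega)]
      cases PySem.List.pyGet? slotsA ptrA with
      | none => rfl
      | some a =>
        cases PySem.List.pyGet? slotsB ptrB with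
        | none =>
          cases (some a).bind mph_pair with
          | none => rfl
          | some p => cases p; rfl
        | some b =>
          cases ha0 : PySem.List.pyGet? a 0 <;> cases ha1 : PySem.List.pyGet? a 1 <;>
            cases hb0 : PySem.List.pyGet? b 0 <;> cases hb1 : PySem.List.pyGet? b 1 <;>
            simp only [Option.bind, mph_pair, ha0, ha1, hb0, hb1] <;> try rfl
          rename_i a0 a1 b0 b1
          by_cases hd : min a1 b1 - max a0 b0 ≥ dur
          · rw [if_pos hd, if_pos hd]
          · rw [if_neg hd, if_neg hd]
            simp only [mph_advance]
            by_cases h1 : a1 < b0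
            · simp only [if_pos h1]; simpa using ih (ptrA + 1) ptrB
            · by_cases h2 : a0 < b1
              · simp only [if_neg h1, if_pos h2]; simpa using ih ptrA (ptrB + 1)
              · simp only [if_neg h1, if_neg h2]; simpa using ih (ptrA + 1) (ptrB + 1)

-- ===== VERDICT (by name: the statement is the Claim_ definition above) =====
theorem meeting_planner_helper_spec : Claim_equal_meeting_planner_helper := by
  intro slotsA slotsB dur ptrA ptrB _ _
  unfold Spec_meeting_planner_helper meeting_planner_helper meeting_planner_helper_alt
  exact mph_go_eq_loop slotsA slotsB dur _ ptrA ptrB
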